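-- pv_equiv track=rewrite | github.com/Yash-Gupta5911/POTD_Solution_GeeksForGeeks | 26-06-2024_Coverage of all Zeros in a Binary Matrix.py | FindCoverage
-- ===== SOURCE A (Python) =====
-- def FindCoverage(matrix):
--     n = len(matrix)
--     m = len(matrix[0])
--     coverage_sum = 0
--
--     for i in range(n):
--         for j in range(m):
--             if matrix[i][j] == 0:
--                 # Check left
--                 if j > 0 and matrix[i][j - 1] == 1:
--                     coverage_sum += 1
--                 # Check right
--                 if j < m - 1 and matrix[i][j + 1] == 1:
--                     coverage_sum += 1
--                 # Check up
--                 if i > 0 and matrix[i - 1][j] == 1: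
--                     coverage_sum += 1
--                 # Check down
--                 if i < n - 1 and matrix[i + 1][j] == 1:
--                     coverage_sum += 1
--
--     return coverage_sum
-- ===== SOURCE B (Python) =====
-- def _edge(a, b):
--     return 1 if (a == 0 and b == 1) or (a == 1 and b == 0) else 0
--
-- def FindCoverage(matrix):
--     n = len(matrix)
--     m = len(matrix[0])
--     total = 0
--     for i in range(n):
--         row = matrix[i]
--         for j in range(m - 1):
--             total += _edge(row[j], row[j + 1])
--     for i in range(n - 1):
--         r1 = matrix[i]
--         r2 = matrix[i + 1]
--         for j in range(m):
--             total += _edge(r1[j], r2[j])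
--     return total
-- ===== Notes on version B (the rewrite author's own statement) =====
-- stated objective: alternative
-- what changed: B enumerates each horizontal and vertical grid edge once and adds a symmetric 0/1 indicator, instead of A's per-cell scan of all four neighbours of every zero cell.
import Mathlib
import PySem

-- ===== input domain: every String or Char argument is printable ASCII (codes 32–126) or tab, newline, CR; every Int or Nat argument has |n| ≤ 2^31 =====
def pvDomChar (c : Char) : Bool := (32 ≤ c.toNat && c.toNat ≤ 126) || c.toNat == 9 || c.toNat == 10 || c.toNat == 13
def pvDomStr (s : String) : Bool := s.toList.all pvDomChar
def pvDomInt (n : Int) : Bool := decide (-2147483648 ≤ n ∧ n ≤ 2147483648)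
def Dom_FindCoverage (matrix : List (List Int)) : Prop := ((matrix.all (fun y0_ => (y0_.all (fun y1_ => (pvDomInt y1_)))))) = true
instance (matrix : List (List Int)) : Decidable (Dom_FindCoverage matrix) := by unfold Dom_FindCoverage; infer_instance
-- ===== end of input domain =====

-- B counts each grid edge once with a symmetric 0/1 indicator instead of A's
-- per-cell scan of all four neighbours of every zero cell (objective: alternative).

-- ===== PORT A =====
-- matrix[i][j]; default 2 is never a cell value that the == 0 / == 1 tests accept,
-- and Pre_ keeps all accessed indices in range (Python raises IndexError otherwise).
def pvCellA (matrix : List (List Int)) (i j : Int) : Int :=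
  PySem.List.pyGetD (PySem.List.pyGetD matrix i []) j 2

def FindCoverage (matrix : List (List Int)) : Int :=
  let n : Int := matrix.length
  let m : Int := (PySem.List.pyGetD matrix 0 []).length
  (PySem.List.pyRange 0 n 1).foldl (fun acc i =>
    (PySem.List.pyRange 0 m 1).foldl (fun acc j =>
      if pvCellA matrix i j = 0 then
        let acc := if 0 < j ∧ pvCellA matrix i (j - 1) = 1 then acc + 1 else acc
        let acc := if j < m - 1 ∧ pvCellA matrix i (j + 1) = 1 then acc + 1 else acc
        let acc := if 0 < i ∧ pvCellA matrix (i - 1) j = 1 then acc + 1 else acc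
        let acc := if i < n - 1 ∧ pvCellA matrix (i + 1) j = 1 then acc + 1 else acc
        acc
      else acc) acc) 0

-- ===== PORT B =====
def pvEdge (a b : Int) : Int :=
  if (a = 0 ∧ b = 1) ∨ (a = 1 ∧ b = 0) then 1 else 0

def FindCoverage_alt (matrix : List (List Int)) : Int :=
  let n : Int := matrix.length
  let m : Int := (PySem.List.pyGetD matrix 0 []).length
  let t1 : Int := (PySem.List.pyRange 0 n 1).foldl (fun acc i =>
      let row := PySem.List.pyGetD matrix i []
      (PySem.List.pyRange 0 (m - 1) 1).foldl (fun acc j =>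
        acc + pvEdge (PySem.List.pyGetD row j 2) (PySem.List.pyGetD row (j + 1) 2)) acc) 0
  (PySem.List.pyRange 0 (n - 1) 1).foldl (fun acc i =>
      let r1 := PySem.List.pyGetD matrix i []
      let r2 := PySem.List.pyGetD matrix (i + 1) []
      (PySem.List.pyRange 0 m 1).foldl (fun acc j =>
        acc + pvEdge (PySem.List.pyGetD r1 j 2) (PySem.List.pyGetD r2 j 2)) acc) t1

-- ===== PRECONDITION & SPEC =====
-- Pre_ excludes exactly the inputs on which the Python A raises IndexError:
-- the empty matrix (len(matrix[0])) and matrices with a row shorter than matrix[0].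
def Pre_FindCoverage (matrix : List (List Int)) : Prop :=
  matrix ≠ [] ∧ ∀ row ∈ matrix, (matrix.headD []).length ≤ row.length
instance (matrix : List (List Int)) : Decidable (Pre_FindCoverage matrix) := by
  unfold Pre_FindCoverage; infer_instance

def pvWitness_FindCoverage : List (List Int) := [[0, 1], [1, 0]]

def Spec_FindCoverage (matrix : List (List Int)) (out : Int) : Prop := out = FindCoverage_alt matrix
instance (matrix : List (List Int)) (out : Int) : Decidable (Spec_FindCoverage matrix out) := by unfold Spec_FindCoverage; infer_instance

-- ===== CLAIM (what is proved, stated in full; the proofs are below) =====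
def Claim_equal_FindCoverage : Prop := ∀ (matrix : List (List Int)), Dom_FindCoverage matrix → Pre_FindCoverage matrix → Spec_FindCoverage matrix (FindCoverage matrix)

-- ===== LEMMAS AND PROOFS =====

-- the cell function both sum forms are about
def pvC (matrix : List (List Int)) (i j : Nat) : Int := (matrix.getD i []).getD j 2

-- A's result as a double Finset sum
def pvSumA (c : Nat → Nat → Int) (n m : Nat) : Int :=
  ∑ i ∈ Finset.range n, ∑ j ∈ Finset.range m,
    (if c i j = 0 then
      (if 0 < j ∧ c i (j - 1) = 1 then (1 : Int) else 0)
      + (if j + 1 < m ∧ c i (j + 1) = 1 then 1 else 0)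
      + (if 0 < i ∧ c (i - 1) j = 1 then 1 else 0)
      + (if i + 1 < n ∧ c (i + 1) j = 1 then 1 else 0)
    else 0)

-- B's result as two double Finset sums
def pvSumB (c : Nat → Nat → Int) (n m : Nat) : Int :=
  (∑ i ∈ Finset.range n, ∑ j ∈ Finset.range (m - 1), pvEdge (c i j) (c i (j + 1)))
  + ∑ i ∈ Finset.range (n - 1), ∑ j ∈ Finset.range m, pvEdge (c i j) (c (i + 1) j)

lemma pv_foldl_sum {α : Type} (l : List α) (g : α → Int) (a : Int) :
    l.foldl (fun acc x => acc + g x) a = a + (l.map g).sum := by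
  induction l generalizing a with
  | nil => simp
  | cons x xs ih => simp [List.foldl_cons, ih, add_assoc]

lemma pv_sum_map_range (n : Nat) (f : Nat → Int) :
    ((List.range n).map f).sum = ∑ i ∈ Finset.range n, f i := by
  induction n with
  | zero => simp
  | succ k ih => simp [List.range_succ, Finset.sum_range_succ, ih]

-- shift lemma: guard 0 < j on range m  ↦  range (m-1)
lemma pv_shift_left (m : Nat) (Q : Nat → Prop) [DecidablePred Q] :
    (∑ j ∈ Finset.range m, if 0 < j ∧ Q j then (1 : Int) else 0)
      = ∑ j ∈ Finset.range (m - 1), if Q (j + 1) then (1 : Int) else 0 := by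
  cases m with
  | zero => simp
  | succ k =>
    rw [Finset.sum_range_succ']
    simp only [Nat.succ_sub_one]
    simp

-- truncation lemma: guard j + 1 < m on range m  ↦  range (m-1)
lemma pv_trunc_right (m : Nat) (Q : Nat → Prop) [DecidablePred Q] :
    (∑ j ∈ Finset.range m, if j + 1 < m ∧ Q j then (1 : Int) else 0)
      = ∑ j ∈ Finset.range (m - 1), if Q j then (1 : Int) else 0 := by
  cases m with
  | zero => simp
  | succ k =>
    rw [Finset.sum_range_succ]
    have hk : (if k + 1 < k + 1 ∧ Q k then (1 : Int) else 0) = 0 := by simp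
    rw [hk, add_zero]
    simp only [Nat.succ_sub_one]
    refine Finset.sum_congr rfl fun j hj => ?_
    have hj' : j + 1 < k + 1 := Nat.succ_lt_succ (Finset.mem_range.mp hj)
    simp [hj']

lemma pv_edge_split (a b : Int) :
    (if b = 0 ∧ a = 1 then (1 : Int) else 0) + (if a = 0 ∧ b = 1 then (1 : Int) else 0)
      = pvEdge a b := by
  unfold pvEdge; split_ifs <;> omega

-- the combinatorial heart: per-cell neighbour count = per-edge count
lemma pv_key (c : Nat → Nat → Int) (n m : Nat) : pvSumA c n m = pvSumB c n m := by
  unfold pvSumA pvSumB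
  have split : ∀ i j,
      (if c i j = 0 then
        (if 0 < j ∧ c i (j - 1) = 1 then (1 : Int) else 0)
        + (if j + 1 < m ∧ c i (j + 1) = 1 then 1 else 0)
        + (if 0 < i ∧ c (i - 1) j = 1 then 1 else 0)
        + (if i + 1 < n ∧ c (i + 1) j = 1 then 1 else 0)
      else 0)
      = (if 0 < j ∧ (c i j = 0 ∧ c i (j - 1) = 1) then (1 : Int) else 0)
        + (if j + 1 < m ∧ (c i j = 0 ∧ c i (j + 1) = 1) then 1 else 0)
        + (if 0 < i ∧ (c i j = 0 ∧ c (i - 1) j = 1) then 1 else 0)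
        + (if i + 1 < n ∧ (c i j = 0 ∧ c (i + 1) j = 1) then 1 else 0) := by
    intro i j
    by_cases hc : c i j = 0 <;> simp [hc]
  simp only [split, Finset.sum_add_distrib]
  have hleft : ∀ i, (∑ j ∈ Finset.range m,
      if 0 < j ∧ (c i j = 0 ∧ c i (j - 1) = 1) then (1 : Int) else 0)
      = ∑ j ∈ Finset.range (m - 1), if c i (j + 1) = 0 ∧ c i j = 1 then (1 : Int) else 0 := by
    intro i
    rw [pv_shift_left m (fun j => c i j = 0 ∧ c i (j - 1) = 1)]
    simp
  have hright : ∀ i, (∑ j ∈ Finset.range m,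
      if j + 1 < m ∧ (c i j = 0 ∧ c i (j + 1) = 1) then (1 : Int) else 0)
      = ∑ j ∈ Finset.range (m - 1), if c i j = 0 ∧ c i (j + 1) = 1 then (1 : Int) else 0 :=
    fun i => pv_trunc_right m (fun j => c i j = 0 ∧ c i (j + 1) = 1)
  have hup : (∑ i ∈ Finset.range n, ∑ j ∈ Finset.range m,
      if 0 < i ∧ (c i j = 0 ∧ c (i - 1) j = 1) then (1 : Int) else 0)
      = ∑ i ∈ Finset.range (n - 1), ∑ j ∈ Finset.range m,
        if c (i + 1) j = 0 ∧ c i j = 1 then (1 : Int) else 0 := by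
    cases n with
    | zero => simp
    | succ k =>
      rw [Finset.sum_range_succ']
      simp only [Nat.succ_sub_one]
      have h0 : (∑ j ∈ Finset.range m,
          if 0 < 0 ∧ (c 0 j = 0 ∧ c (0 - 1) j = 1) then (1 : Int) else 0) = 0 := by simp
      rw [h0, add_zero]
      refine Finset.sum_congr rfl fun i _ => Finset.sum_congr rfl fun j _ => ?_
      simp [Nat.succ_pos]
  have hdown : (∑ i ∈ Finset.range n, ∑ j ∈ Finset.range m,
      if i + 1 < n ∧ (c i j = 0 ∧ c (i + 1) j = 1) then (1 : Int) else 0)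
      = ∑ i ∈ Finset.range (n - 1), ∑ j ∈ Finset.range m,
        if c i j = 0 ∧ c (i + 1) j = 1 then (1 : Int) else 0 := by
    cases n with
    | zero => simp
    | succ k =>
      rw [Finset.sum_range_succ]
      simp only [Nat.succ_sub_one]
      have hk : (∑ j ∈ Finset.range m,
          if k + 1 < k + 1 ∧ (c k j = 0 ∧ c (k + 1) j = 1) then (1 : Int) else 0) = 0 := by simp
      rw [hk, add_zero]
      refine Finset.sum_congr rfl fun i hi => Finset.sum_congr rfl fun j _ => ?_
      have hi' : i + 1 < k + 1 := Nat.succ_lt_succ (Finset.mem_range.mp hi)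
      simp [hi']
  simp only [Finset.sum_congr rfl (fun i _ => hleft i),
             Finset.sum_congr rfl (fun i _ => hright i), hup, hdown]
  have hH : (∑ i ∈ Finset.range n, ∑ j ∈ Finset.range (m - 1),
        if c i (j + 1) = 0 ∧ c i j = 1 then (1 : Int) else 0)
      + (∑ i ∈ Finset.range n, ∑ j ∈ Finset.range (m - 1),
        if c i j = 0 ∧ c i (j + 1) = 1 then (1 : Int) else 0)
      = ∑ i ∈ Finset.range n, ∑ j ∈ Finset.range (m - 1), pvEdge (c i j) (c i (j + 1)) := by
    rw [← Finset.sum_add_distrib]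
    refine Finset.sum_congr rfl fun i _ => ?_
    rw [← Finset.sum_add_distrib]
    exact Finset.sum_congr rfl fun j _ => pv_edge_split (c i j) (c i (j + 1))
  have hV : (∑ i ∈ Finset.range (n - 1), ∑ j ∈ Finset.range m,
        if c (i + 1) j = 0 ∧ c i j = 1 then (1 : Int) else 0)
      + (∑ i ∈ Finset.range (n - 1), ∑ j ∈ Finset.range m,
        if c i j = 0 ∧ c (i + 1) j = 1 then (1 : Int) else 0)
      = ∑ i ∈ Finset.range (n - 1), ∑ j ∈ Finset.range m, pvEdge (c i j) (c (i + 1) j) := by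
    rw [← Finset.sum_add_distrib]
    refine Finset.sum_congr rfl fun i _ => ?_
    rw [← Finset.sum_add_distrib]
    exact Finset.sum_congr rfl fun j _ => pv_edge_split (c i j) (c (i + 1) j)
  linarith [hH, hV]

-- ===== port-to-sum bridges =====

lemma pv_cell_cast (matrix : List (List Int)) (i j : Nat) :
    pvCellA matrix (i : Int) (j : Int) = pvC matrix i j := by
  simp [pvCellA, pvC, PySem.List.pyGetD_natCast]

lemma pv_sum_pyRange (n : Nat) (g : Int → Int) :
    ((PySem.List.pyRange 0 (n : Int) 1).map g).sum = ∑ k ∈ Finset.range n, g (k : Int) := by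
  rw [PySem.List.pyRange_zero_natCast, List.map_map, pv_sum_map_range]
  rfl

lemma pv_pyRange_pred (n : Nat) :
    PySem.List.pyRange 0 ((n : Int) - 1) 1 = PySem.List.pyRange 0 ((n - 1 : Nat) : Int) 1 := by
  have h : ((n : Int) - 1 - 0).toNat = (((n - 1 : Nat) : Int) - 0).toNat := by omega
  rw [PySem.List.pyRange_one, PySem.List.pyRange_one, h]

lemma pv_int_body (cell : Int) (l r u d : Prop) [Decidable l] [Decidable r] [Decidable u]
    [Decidable d] (acc : Int) :
    (if cell = 0 then
      let acc := if l then acc + 1 else acc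
      let acc := if r then acc + 1 else acc
      let acc := if u then acc + 1 else acc
      let acc := if d then acc + 1 else acc
      acc
    else acc)
    = acc + (if cell = 0 then
        (if l then (1 : Int) else 0) + (if r then 1 else 0) + (if u then 1 else 0)
        + (if d then 1 else 0) else 0) := by
  split_ifs <;> ring

lemma pv_portA (matrix : List (List Int)) :
    FindCoverage matrix
      = pvSumA (pvC matrix) matrix.length (PySem.List.pyGetD matrix 0 []).length := by
  unfold FindCoverage
  dsimp only
  set N := matrix.length with hN
  set M := (PySem.List.pyGetD matrix 0 []).length with hM
  have hinner : ∀ (iI acc : Int),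
      (PySem.List.pyRange 0 (M : Int) 1).foldl (fun acc jI =>
        if pvCellA matrix iI jI = 0 then
          let acc := if 0 < jI ∧ pvCellA matrix iI (jI - 1) = 1 then acc + 1 else acc
          let acc := if jI < (M : Int) - 1 ∧ pvCellA matrix iI (jI + 1) = 1 then acc + 1 else acc
          let acc := if 0 < iI ∧ pvCellA matrix (iI - 1) jI = 1 then acc + 1 else acc
          let acc := if iI < (N : Int) - 1 ∧ pvCellA matrix (iI + 1) jI = 1 then acc + 1 else acc
          acc
        else acc) acc
      = acc + ∑ j ∈ Finset.range M,
          (if pvCellA matrix iI (j : Int) = 0 then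
            (if 0 < (j : Int) ∧ pvCellA matrix iI ((j : Int) - 1) = 1 then (1 : Int) else 0)
            + (if (j : Int) < (M : Int) - 1 ∧ pvCellA matrix iI ((j : Int) + 1) = 1 then 1 else 0)
            + (if 0 < iI ∧ pvCellA matrix (iI - 1) (j : Int) = 1 then 1 else 0)
            + (if iI < (N : Int) - 1 ∧ pvCellA matrix (iI + 1) (j : Int) = 1 then 1 else 0)
          else 0) := by
    intro iI acc
    have hf : (fun (acc jI : Int) =>
        if pvCellA matrix iI jI = 0 then
          let acc := if 0 < jI ∧ pvCellA matrix iI (jI - 1) = 1 then acc + 1 else acc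
          let acc := if jI < (M : Int) - 1 ∧ pvCellA matrix iI (jI + 1) = 1 then acc + 1 else acc
          let acc := if 0 < iI ∧ pvCellA matrix (iI - 1) jI = 1 then acc + 1 else acc
          let acc := if iI < (N : Int) - 1 ∧ pvCellA matrix (iI + 1) jI = 1 then acc + 1 else acc
          acc
        else acc)
        = fun acc jI => acc + (if pvCellA matrix iI jI = 0 then
            (if 0 < jI ∧ pvCellA matrix iI (jI - 1) = 1 then (1 : Int) else 0)
            + (if jI < (M : Int) - 1 ∧ pvCellA matrix iI (jI + 1) = 1 then 1 else 0)
            + (if 0 < iI ∧ pvCellA matrix (iI - 1) jI = 1 then 1 else 0)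
            + (if iI < (N : Int) - 1 ∧ pvCellA matrix (iI + 1) jI = 1 then 1 else 0)
          else 0) :=
      funext fun acc => funext fun jI => pv_int_body _ _ _ _ _ acc
    rw [hf, pv_foldl_sum, pv_sum_pyRange]
  have houter : (fun (acc iI : Int) =>
      (PySem.List.pyRange 0 (M : Int) 1).foldl (fun acc jI =>
        if pvCellA matrix iI jI = 0 then
          let acc := if 0 < jI ∧ pvCellA matrix iI (jI - 1) = 1 then acc + 1 else acc
          let acc := if jI < (M : Int) - 1 ∧ pvCellA matrix iI (jI + 1) = 1 then acc + 1 else acc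
          let acc := if 0 < iI ∧ pvCellA matrix (iI - 1) jI = 1 then acc + 1 else acc
          let acc := if iI < (N : Int) - 1 ∧ pvCellA matrix (iI + 1) jI = 1 then acc + 1 else acc
          acc
        else acc) acc)
      = fun acc iI => acc + ∑ j ∈ Finset.range M,
          (if pvCellA matrix iI (j : Int) = 0 then
            (if 0 < (j : Int) ∧ pvCellA matrix iI ((j : Int) - 1) = 1 then (1 : Int) else 0)
            + (if (j : Int) < (M : Int) - 1 ∧ pvCellA matrix iI ((j : Int) + 1) = 1 then 1 else 0)
            + (if 0 < iI ∧ pvCellA matrix (iI - 1) (j : Int) = 1 then 1 else 0)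
            + (if iI < (N : Int) - 1 ∧ pvCellA matrix (iI + 1) (j : Int) = 1 then 1 else 0)
          else 0) :=
    funext fun acc => funext fun iI => hinner iI acc
  rw [houter, pv_foldl_sum, pv_sum_pyRange, zero_add]
  unfold pvSumA
  refine Finset.sum_congr rfl fun i _ => Finset.sum_congr rfl fun j _ => ?_
  have e1 : (0 < (j : Int) ∧ pvCellA matrix (i : Int) ((j : Int) - 1) = 1)
      ↔ (0 < j ∧ pvC matrix i (j - 1) = 1) := by
    by_cases h0 : 0 < j
    · have hj : ((j : Int) - 1) = ((j - 1 : Nat) : Int) := by omega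
      rw [hj, pv_cell_cast]
      simp [h0]
    · have h0' : ¬ (0 : Int) < (j : Int) := by omega
      simp [h0, h0']
  have e2 : ((j : Int) < (M : Int) - 1 ∧ pvCellA matrix (i : Int) ((j : Int) + 1) = 1)
      ↔ (j + 1 < M ∧ pvC matrix i (j + 1) = 1) := by
    have hj : ((j : Int) + 1) = ((j + 1 : Nat) : Int) := by omega
    have hm : ((j : Int) < (M : Int) - 1) ↔ (j + 1 < M) := by omega
    rw [hj, pv_cell_cast, hm]
  have e3 : (0 < (i : Int) ∧ pvCellA matrix ((i : Int) - 1) (j : Int) = 1)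
      ↔ (0 < i ∧ pvC matrix (i - 1) j = 1) := by
    by_cases h0 : 0 < i
    · have hi : ((i : Int) - 1) = ((i - 1 : Nat) : Int) := by omega
      rw [hi, pv_cell_cast]
      simp [h0]
    · have h0' : ¬ (0 : Int) < (i : Int) := by omega
      simp [h0, h0']
  have e4 : ((i : Int) < (N : Int) - 1 ∧ pvCellA matrix ((i : Int) + 1) (j : Int) = 1)
      ↔ (i + 1 < N ∧ pvC matrix (i + 1) j = 1) := by
    have hi : ((i : Int) + 1) = ((i + 1 : Nat) : Int) := by omega
    have hn : ((i : Int) < (N : Int) - 1) ↔ (i + 1 < N) := by omega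
    rw [hi, pv_cell_cast, hn]
  simp only [pv_cell_cast, e1, e2, e3, e4]

lemma pv_portB (matrix : List (List Int)) :
    FindCoverage_alt matrix
      = pvSumB (pvC matrix) matrix.length (PySem.List.pyGetD matrix 0 []).length := by
  unfold FindCoverage_alt
  dsimp only
  set N := matrix.length with hN
  set M := (PySem.List.pyGetD matrix 0 []).length with hM
  rw [pv_pyRange_pred M, pv_pyRange_pred N]
  have hcell : ∀ (i j : Nat),
      PySem.List.pyGetD (PySem.List.pyGetD matrix (i : Int) []) (j : Int) 2 = pvC matrix i j := by
    intro i j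
    simp [pvC, PySem.List.pyGetD_natCast]
  have hin1 : ∀ (iI acc : Int),
      (PySem.List.pyRange 0 ((M - 1 : Nat) : Int) 1).foldl (fun acc jI =>
        acc + pvEdge (PySem.List.pyGetD (PySem.List.pyGetD matrix iI []) jI 2)
          (PySem.List.pyGetD (PySem.List.pyGetD matrix iI []) (jI + 1) 2)) acc
      = acc + ∑ j ∈ Finset.range (M - 1),
          pvEdge (PySem.List.pyGetD (PySem.List.pyGetD matrix iI []) (j : Int) 2)
            (PySem.List.pyGetD (PySem.List.pyGetD matrix iI []) ((j : Int) + 1) 2) := by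
    intro iI acc
    rw [pv_foldl_sum, pv_sum_pyRange]
  have h1 : (fun (acc iI : Int) =>
      (PySem.List.pyRange 0 ((M - 1 : Nat) : Int) 1).foldl (fun acc jI =>
        acc + pvEdge (PySem.List.pyGetD (PySem.List.pyGetD matrix iI []) jI 2)
          (PySem.List.pyGetD (PySem.List.pyGetD matrix iI []) (jI + 1) 2)) acc)
      = fun acc iI => acc + ∑ j ∈ Finset.range (M - 1),
          pvEdge (PySem.List.pyGetD (PySem.List.pyGetD matrix iI []) (j : Int) 2)
            (PySem.List.pyGetD (PySem.List.pyGetD matrix iI []) ((j : Int) + 1) 2) :=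
    funext fun acc => funext fun iI => hin1 iI acc
  have hin2 : ∀ (iI acc : Int),
      (PySem.List.pyRange 0 (M : Int) 1).foldl (fun acc jI =>
        acc + pvEdge (PySem.List.pyGetD (PySem.List.pyGetD matrix iI []) jI 2)
          (PySem.List.pyGetD (PySem.List.pyGetD matrix (iI + 1) []) jI 2)) acc
      = acc + ∑ j ∈ Finset.range M,
          pvEdge (PySem.List.pyGetD (PySem.List.pyGetD matrix iI []) (j : Int) 2)
            (PySem.List.pyGetD (PySem.List.pyGetD matrix (iI + 1) []) (j : Int) 2) := by
    intro iI acc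
    rw [pv_foldl_sum, pv_sum_pyRange]
  have h2 : (fun (acc iI : Int) =>
      (PySem.List.pyRange 0 (M : Int) 1).foldl (fun acc jI =>
        acc + pvEdge (PySem.List.pyGetD (PySem.List.pyGetD matrix iI []) jI 2)
          (PySem.List.pyGetD (PySem.List.pyGetD matrix (iI + 1) []) jI 2)) acc)
      = fun acc iI => acc + ∑ j ∈ Finset.range M,
          pvEdge (PySem.List.pyGetD (PySem.List.pyGetD matrix iI []) (j : Int) 2)
            (PySem.List.pyGetD (PySem.List.pyGetD matrix (iI + 1) []) (j : Int) 2) :=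
    funext fun acc => funext fun iI => hin2 iI acc
  rw [h1, h2, pv_foldl_sum, pv_foldl_sum, pv_sum_pyRange, pv_sum_pyRange, zero_add]
  unfold pvSumB
  have c1 : ∀ i j : Nat,
      pvEdge (PySem.List.pyGetD (PySem.List.pyGetD matrix (i : Int) []) (j : Int) 2)
          (PySem.List.pyGetD (PySem.List.pyGetD matrix (i : Int) []) ((j : Int) + 1) 2)
        = pvEdge (pvC matrix i j) (pvC matrix i (j + 1)) := by
    intro i j
    have hj : ((j : Int) + 1) = ((j + 1 : Nat) : Int) := by omega
    rw [hj, hcell, hcell]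
  have c2 : ∀ i j : Nat,
      pvEdge (PySem.List.pyGetD (PySem.List.pyGetD matrix (i : Int) []) (j : Int) 2)
          (PySem.List.pyGetD (PySem.List.pyGetD matrix ((i : Int) + 1) []) (j : Int) 2)
        = pvEdge (pvC matrix i j) (pvC matrix (i + 1) j) := by
    intro i j
    have hi : ((i : Int) + 1) = ((i + 1 : Nat) : Int) := by omega
    rw [hi, hcell, hcell]
  congr 1
  · exact Finset.sum_congr rfl fun i _ => Finset.sum_congr rfl fun j _ => c1 i j
  · exact Finset.sum_congr rfl fun i _ => Finset.sum_congr rfl fun j _ => c2 i j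

-- ===== VERDICT (by name: the statement is the Claim_ definition above) =====
theorem FindCoverage_spec : Claim_equal_FindCoverage := by
  intro matrix _ _
  unfold Spec_FindCoverage
  rw [pv_portA, pv_portB, pv_key]
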